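-- pv_equiv track=rewrite | github.com/k2invested/.cors | loop.py | _match_policy
-- ===== SOURCE A (Python) =====
-- def _match_policy(path: str, policy: dict) -> dict | None:
--     """Find the policy that applies to a given path.
--     Checks exact match first, then prefix match (longest wins)."""
--     # Exact match
--     if path in policy:
--         return policy[path]
--     # Prefix match — longest prefix wins
--     best = None
--     best_len = 0
--     for prefix, rule in policy.items():
--         if prefix.endswith("/") and path.startswith(prefix) and len(prefix) > best_len:
--             best = rule
--             best_len = len(prefix)
--     return best
-- ===== SOURCE B (Python) =====
-- def _match_policy(path: str, policy: dict) -> dict | None: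
--     """Exact match first; else walk the path's slash-terminated prefixes,
--     longest first, and return the first one present in the dict."""
--     if path in policy:
--         return policy[path]
--     for i in range(len(path), 0, -1):
--         if path[i - 1] == "/":
--             cand = path[:i]
--             if cand in policy:
--                 return policy[cand]
--     return None
-- ===== Notes on version B (the rewrite author's own statement) =====
-- stated objective: alternative
-- what changed: Instead of scanning every policy key and testing it as a slash-terminated prefix of the path, B enumerates the path's own slash-terminated prefixes longest-first and does one dict lookup per slash, returning on the first hit; it trades a scan over the keys for a scan over the path.
import Mathlib
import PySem

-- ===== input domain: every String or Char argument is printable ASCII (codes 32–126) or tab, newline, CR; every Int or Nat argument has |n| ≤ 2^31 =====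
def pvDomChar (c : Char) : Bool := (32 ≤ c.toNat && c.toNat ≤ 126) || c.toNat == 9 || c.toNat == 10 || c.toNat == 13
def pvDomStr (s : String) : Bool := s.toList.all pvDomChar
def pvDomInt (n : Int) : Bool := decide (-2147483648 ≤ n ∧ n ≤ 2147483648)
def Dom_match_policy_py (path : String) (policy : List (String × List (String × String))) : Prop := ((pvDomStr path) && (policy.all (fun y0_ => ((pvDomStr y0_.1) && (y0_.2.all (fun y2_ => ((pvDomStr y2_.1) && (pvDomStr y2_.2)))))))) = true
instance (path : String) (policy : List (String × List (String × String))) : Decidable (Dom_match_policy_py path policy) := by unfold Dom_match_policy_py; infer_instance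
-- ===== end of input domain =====

-- B replaces A's scan over all policy keys by one dict lookup per slash-terminated
-- prefix of the path, tried longest first (objective: alternative algorithm, same cost).

-- ===== PORT A =====
-- literal transliteration of _match_policy: exact lookup, then a loop over the
-- dict items keeping the longest slash-terminated prefix seen so far
def match_policy_py (path : String) (policy : List (String × List (String × String))) : Option (List (String × String)) :=
  let d := PySem.Dict.ofList policy
  if d.contains path then d.get? path
  else
    (d.items.foldl
      (fun (st : Option (List (String × String)) × Int) pr =>
        if PySem.Str.endswith pr.1 "/" && PySem.Str.startswith path pr.1
             && decide (PySem.Str.len pr.1 > st.2)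
        then (some pr.2, PySem.Str.len pr.1) else st)
      (none, 0)).1

-- ===== PORT B =====
-- the loop 'for i in range(len(path), 0, -1)' of Source B, as recursion on i;
-- path[i-1] is the character at index i-1 (here the `i` of the `i+1` case)
def pvAltScan (path : String) (d : PySem.Dict String (List (String × String))) :
    Nat → Option (List (String × String))
  | 0 => none
  | i + 1 =>
    if PySem.Str.pyGet? path (i : Int) == some '/' then
      match d.get? (PySem.Str.slice path none (some ((i : Int) + 1))) with
      | some r => some r
      | none => pvAltScan path d i
    else pvAltScan path d i

def match_policy_py_alt (path : String) (policy : List (String × List (String × String))) : Option (List (String × String)) :=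
  let d := PySem.Dict.ofList policy
  if d.contains path then d.get? path
  else pvAltScan path d path.toList.length

-- ===== PRECONDITION & SPEC =====
def Spec_match_policy_py (path : String) (policy : List (String × List (String × String))) (out : Option (List (String × String))) : Prop := out = match_policy_py_alt path policy
instance (path : String) (policy : List (String × List (String × String))) (out : Option (List (String × String))) : Decidable (Spec_match_policy_py path policy out) := by unfold Spec_match_policy_py; infer_instance

-- ===== CLAIM (what is proved, stated in full; the proofs are below) =====
def Claim_equal_match_policy_py : Prop := ∀ (path : String) (policy : List (String × List (String × String))), Dom_match_policy_py path policy → Spec_match_policy_py path policy (match_policy_py path policy)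

-- ===== LEMMAS AND PROOFS =====

-- the prefix test of A's loop body
def pvP (path k : String) : Bool :=
  PySem.Str.endswith k "/" && PySem.Str.startswith path k

def pvLenOf (o : Option (String × List (String × String))) : Int :=
  o.elim 0 (fun x => PySem.Str.len x.1)

-- A's loop, but keeping the whole winning item instead of (rule, length)
def pvPick (path : String) (l : List (String × List (String × String)))
    (o : Option (String × List (String × String))) : Option (String × List (String × String)) :=
  l.foldl (fun o pr => if pvP path pr.1 && decide (PySem.Str.len pr.1 > pvLenOf o) then some pr else o) o

lemma pvFoldA_eq (path : String) (l : List (String × List (String × String)))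
    (o : Option (String × List (String × String))) :
    l.foldl
      (fun (st : Option (List (String × String)) × Int) pr =>
        if PySem.Str.endswith pr.1 "/" && PySem.Str.startswith path pr.1
             && decide (PySem.Str.len pr.1 > st.2)
        then (some pr.2, PySem.Str.len pr.1) else st)
      (o.map (·.2), pvLenOf o)
    = ((pvPick path l o).map (·.2), pvLenOf (pvPick path l o)) := by
  induction l generalizing o with
  | nil => simp [pvPick]
  | cons y t ih =>
    simp only [List.foldl_cons, pvPick, pvP] at *
    by_cases h : (PySem.Str.endswith y.1 "/" && PySem.Str.startswith path y.1
        && decide (PySem.Str.len y.1 > pvLenOf o)) = true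
    · rw [if_pos h, if_pos h]
      have := ih (some y)
      simpa [pvLenOf] using this
    · rw [if_neg h, if_neg h]
      exact ih o

-- running strict-argmax specification of pvPick
lemma pvPick_spec (path : String) (l : List (String × List (String × String)))
    (o : Option (String × List (String × String))) :
    (pvPick path l o = o ∨ ∃ x ∈ l, pvPick path l o = some x ∧ pvP path x.1 = true) ∧
    pvLenOf o ≤ pvLenOf (pvPick path l o) ∧
    ∀ y ∈ l, pvP path y.1 = true → PySem.Str.len y.1 ≤ pvLenOf (pvPick path l o) := by
  induction l generalizing o with
  | nil => simp [pvPick]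
  | cons z t ih =>
    simp only [pvPick, List.foldl_cons] at *
    by_cases h : (pvP path z.1 && decide (PySem.Str.len z.1 > pvLenOf o)) = true
    · rw [if_pos h]
      obtain ⟨h1, h2, h3⟩ := ih (some z)
      simp only [Bool.and_eq_true, decide_eq_true_eq] at h
      refine ⟨?_, le_trans (le_of_lt h.2) ?_, ?_⟩
      · rcases h1 with h1 | ⟨x, hx, hpick, hP⟩
        · exact Or.inr ⟨z, List.mem_cons_self .., h1, h.1⟩
        · exact Or.inr ⟨x, List.mem_cons_of_mem _ hx, hpick, hP⟩
      · simpa [pvLenOf] using h2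
      · intro y hy hPy
        rcases List.mem_cons.mp hy with rfl | hy
        · exact h2
        · exact h3 y hy hPy
    · rw [if_neg h]
      obtain ⟨h1, h2, h3⟩ := ih o
      refine ⟨?_, h2, ?_⟩
      · rcases h1 with h1 | h1
        · exact Or.inl h1
        · obtain ⟨x, hx, hpick, hP⟩ := h1; exact Or.inr ⟨x, List.mem_cons_of_mem _ hx, hpick, hP⟩
      · intro y hy hPy
        rcases List.mem_cons.mp hy with rfl | hy
        · simp only [Bool.and_eq_true, decide_eq_true_eq, not_and, not_lt] at h
          exact le_trans (h hPy) h2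
        · exact h3 y hy hPy

-- a key passes A's test iff it is a slash-terminated prefix of the path
lemma pvP_iff (path k : String) :
    pvP path k = true ↔
      ∃ j : Nat, j < path.toList.length ∧ k.toList = path.toList.take (j + 1) ∧
        path.toList[j]? = some '/' := by
  constructor
  · intro h
    simp only [pvP, Bool.and_eq_true, PySem.Str.endswith_eq, PySem.Str.startswith_eq,
      PySem.Chars.endswith_iff, PySem.Chars.startswith_iff] at h
    obtain ⟨hsuf, hpre⟩ := h
    obtain ⟨s, hs⟩ := hsuf
    have hk : k.toList = s ++ ['/'] := by simpa using hs.symm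
    have hlen : k.toList.length = s.length + 1 := by rw [hk]; simp
    have hlenle : k.toList.length ≤ path.toList.length := hpre.length_le
    refine ⟨s.length, by omega, ?_, ?_⟩
    · calc k.toList = List.take k.toList.length path.toList := List.prefix_iff_eq_take.mp hpre
        _ = _ := by rw [hlen]
    · obtain ⟨t, ht⟩ := hpre
      have h1 : path.toList[s.length]? = (k.toList ++ t)[s.length]? := by rw [ht]
      rw [h1, List.getElem?_append_left (by omega), hk]
      exact List.getElem?_concat_length
  · rintro ⟨j, hj, hk, hget⟩
    simp only [pvP, Bool.and_eq_true, PySem.Str.endswith_eq, PySem.Str.startswith_eq,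
      PySem.Chars.endswith_iff, PySem.Chars.startswith_iff]
    constructor
    · rw [hk, List.take_succ, hget]
      exact ⟨path.toList.take j, rfl⟩
    · rw [hk]; exact List.take_prefix _ _

lemma pvCand_toList (path : String) (j : Nat) :
    (PySem.Str.slice path none (some ((j : Int) + 1))).toList = path.toList.take (j + 1) := by
  rw [PySem.Str.toList_slice, PySem.Chars.slice_eq_listSlice,
    show ((j : Int) + 1) = ((j + 1 : Nat) : Int) by push_cast; ring]
  exact PySem.List.slice_to_natCast _ _

lemma pvAltScan_none (path : String) (d : PySem.Dict String (List (String × String)))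
    (h : ∀ y ∈ d.items, pvP path y.1 = false) :
    ∀ n, n ≤ path.toList.length → pvAltScan path d n = none := by
  intro n
  induction n with
  | zero => intro _; rfl
  | succ i ih =>
    intro hle
    rw [pvAltScan]
    by_cases hch : (PySem.Str.pyGet? path (i : Int) == some '/') = true
    · rw [if_pos hch]
      cases hg : d.get? (PySem.Str.slice path none (some ((i : Int) + 1))) with
      | none => simpa using ih (by omega)
      | some r =>
        exfalso
        have hmem := PySem.Dict.mem_items_of_get?_eq_some d hg
        have hchar : path.toList[i]? = some '/' := by
          simpa [PySem.Str.pyGet?_natCast] using hch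
        have hP : pvP path (PySem.Str.slice path none (some ((i : Int) + 1))) = true :=
          (pvP_iff path _).mpr ⟨i, by omega, pvCand_toList path i, hchar⟩
        have := h _ hmem
        simp only at this
        rw [hP] at this
        exact Bool.noConfusion this
    · rw [if_neg hch]; exact ih (by omega)

lemma pvAltScan_descend (path : String) (d : PySem.Dict String (List (String × String))) (m : Nat)
    (h : ∀ j, m ≤ j → j < path.toList.length →
      path.toList[j]? ≠ some '/' ∨ d.get? (PySem.Str.slice path none (some ((j : Int) + 1))) = none) :
    ∀ k, m + k ≤ path.toList.length → pvAltScan path d (m + k) = pvAltScan path d m := by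
  intro k
  induction k with
  | zero => intro _; rfl
  | succ k ih =>
    intro hle
    rw [show m + (k + 1) = (m + k) + 1 by omega, pvAltScan]
    rcases h (m + k) (by omega) (by omega) with hch | hg
    · rw [if_neg ?_]
      · exact ih (by omega)
      · simp only [PySem.Str.pyGet?_natCast, beq_iff_eq]
        exact hch
    · by_cases hch : (PySem.Str.pyGet? path ((m + k : Nat) : Int) == some '/') = true
      · rw [if_pos ?_]
        · rw [show (((m + k : Nat) : Int) + 1) = ((m + k : Nat) : Int) + 1 from rfl]
          rw [hg]
          exact ih (by omega)
        · exact hch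
      · rw [if_neg ?_]
        · exact ih (by omega)
        · exact hch

-- ===== VERDICT (by name: the statement is the Claim_ definition above) =====
-- Str.len of a string whose characters are a take-prefix of the path
lemma pvLen_of_take (path k : String) (j : Nat) (hj : j < path.toList.length)
    (hk : k.toList = path.toList.take (j + 1)) : PySem.Str.len k = (j : Int) + 1 := by
  rw [PySem.Str.len_eq, hk, List.length_take]
  omega

theorem match_policy_py_spec : Claim_equal_match_policy_py := by
  intro path policy _
  unfold Spec_match_policy_py match_policy_py match_policy_py_alt
  by_cases hc : (PySem.Dict.ofList policy).contains path = true
  · rw [if_pos hc, if_pos hc]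
  · rw [if_neg hc, if_neg hc]
    have hnd := PySem.Dict.nodup_keys_ofList policy
    have hfold := pvFoldA_eq path (PySem.Dict.ofList policy).items none
    rw [show ((Option.map (fun x : String × List (String × String) => x.2) none, pvLenOf none))
        = ((none : Option (List (String × String))), (0 : Int)) from rfl] at hfold
    obtain ⟨h1, h2, h3⟩ := pvPick_spec path (PySem.Dict.ofList policy).items none
    cases hr : pvPick path (PySem.Dict.ofList policy).items none with
    | none =>
      rw [hr] at hfold
      rw [hfold]
      refine (Eq.symm (pvAltScan_none path _ ?_ _ le_rfl))
      intro y hy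
      by_contra hPy
      have hPy : pvP path y.1 = true := by
        cases hb : pvP path y.1
        · exact absurd hb hPy
        · rfl
      have hle := h3 y hy hPy
      rw [hr] at hle
      obtain ⟨j, hj, hk, _⟩ := (pvP_iff path y.1).mp hPy
      have := pvLen_of_take path y.1 j hj hk
      rw [this] at hle
      simp only [pvLenOf, Option.elim] at hle
      omega
    | some x =>
      rw [hr] at hfold
      rw [hfold]
      simp only [Option.map_some]
      have hx : x ∈ (PySem.Dict.ofList policy).items ∧ pvP path x.1 = true := by
        rcases h1 with h1 | ⟨z, hz, hpick, hP⟩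
        · rw [hr] at h1; exact absurd h1 (by simp)
        · rw [hr] at hpick
          injection hpick with hxz
          subst hxz
          exact ⟨hz, hP⟩
      obtain ⟨hmem, hP⟩ := hx
      obtain ⟨j, hj, hk, hchar⟩ := (pvP_iff path x.1).mp hP
      have hget : (PySem.Dict.ofList policy).get? x.1 = some x.2 :=
        PySem.Dict.get?_of_mem_items _ hmem hnd
      -- no hit strictly above index j
      have hnohit : ∀ j', j + 1 ≤ j' → j' < path.toList.length →
          path.toList[j']? ≠ some '/' ∨
          (PySem.Dict.ofList policy).get? (PySem.Str.slice path none (some ((j' : Int) + 1))) = none := by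
        intro j' hj1 hj2
        by_cases hch : path.toList[j']? = some '/'
        · refine Or.inr ?_
          cases hg : (PySem.Dict.ofList policy).get?
              (PySem.Str.slice path none (some ((j' : Int) + 1))) with
          | none => rfl
          | some r =>
            exfalso
            have hmem' := PySem.Dict.mem_items_of_get?_eq_some _ hg
            have hP' : pvP path (PySem.Str.slice path none (some ((j' : Int) + 1))) = true :=
              (pvP_iff path _).mpr ⟨j', hj2, pvCand_toList path j', hch⟩
            have hle := h3 _ hmem' hP'
            rw [hr] at hle
            rw [pvLen_of_take path _ j' hj2 (pvCand_toList path j')] at hle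
            have hxlen : pvLenOf (some x) = (j : Int) + 1 := by
              simp only [pvLenOf, Option.elim]
              exact pvLen_of_take path x.1 j hj hk
            rw [hxlen] at hle
            omega
        · exact Or.inl hch
      have hdesc := pvAltScan_descend path (PySem.Dict.ofList policy) (j + 1) hnohit
        (path.toList.length - (j + 1)) (by omega)
      rw [show (j + 1) + (path.toList.length - (j + 1)) = path.toList.length by omega] at hdesc
      rw [hdesc, pvAltScan]
      rw [if_pos ?_]
      · have hcand : PySem.Str.slice path none (some ((j : Int) + 1)) = x.1 :=
          String.toList_inj.mp (by rw [pvCand_toList path j, hk])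
        rw [hcand, hget]
      · simp only [PySem.Str.pyGet?_natCast, beq_iff_eq]
        exact hchar
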